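-- pv_equiv track=rewrite | github.com/Kinggerm/GetOrganelle | Utilities/check_annotations.py | parse_geneious_fasta
-- ===== SOURCE A (Python) =====
-- def parse_geneious_fasta(fasta_matrix):
--     seq_dict = {}
--     for i in range(len(fasta_matrix[0])):
--         this_annotation = fasta_matrix[0][i].split('_-_')[-1].replace("_cds", "_CDS").replace("_trna", "_tRNA").replace("_rrna", "rRNA")
--         if this_annotation in seq_dict:
--             if fasta_matrix[1][i] not in seq_dict[this_annotation]:
--                 seq_dict[this_annotation].append(fasta_matrix[1][i])
--         else:
--             seq_dict[this_annotation] = [fasta_matrix[1][i]]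
--     return seq_dict, list(seq_dict)
-- ===== SOURCE B (Python) =====
-- def parse_geneious_fasta(fasta_matrix):
--     annotations = [name.split('_-_')[-1].replace("_cds", "_CDS").replace("_trna", "_tRNA").replace("_rrna", "rRNA")
--                    for name in fasta_matrix[0]]
--     # distinct annotations in first-occurrence order: these are the output keys
--     keys = []
--     for ann in annotations:
--         if ann not in keys:
--             keys.append(ann)
--     # for each key, gather its distinct sequences with a full scan over the pairs
--     seq_dict = {}
--     for key in keys:
--         group = []
--         for ann, seq in zip(annotations, fasta_matrix[1]):
--             if ann == key and seq not in group:
--                 group.append(seq)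
--         seq_dict[key] = group
--     return seq_dict, keys
-- ===== Notes on version B (the rewrite author's own statement) =====
-- stated objective: alternative
-- what changed: B abandons A's incremental dict build (membership branch per element) for a key-directed nested scan: it first computes the distinct cleaned annotations in first-occurrence order, then for each key runs a separate full scan over the (annotation, sequence) pairs collecting that key's distinct sequences.
import Mathlib
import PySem

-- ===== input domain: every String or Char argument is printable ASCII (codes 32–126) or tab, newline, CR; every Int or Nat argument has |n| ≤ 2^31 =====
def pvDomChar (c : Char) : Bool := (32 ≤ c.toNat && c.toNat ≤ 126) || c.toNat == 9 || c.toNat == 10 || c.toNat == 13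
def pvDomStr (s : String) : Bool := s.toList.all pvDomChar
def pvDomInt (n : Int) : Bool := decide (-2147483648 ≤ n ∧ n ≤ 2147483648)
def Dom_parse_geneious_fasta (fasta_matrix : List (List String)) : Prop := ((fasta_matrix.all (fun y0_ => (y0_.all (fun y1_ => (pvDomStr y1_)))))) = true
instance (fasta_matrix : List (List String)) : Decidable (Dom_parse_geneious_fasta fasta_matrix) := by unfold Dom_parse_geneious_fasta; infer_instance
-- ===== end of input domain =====

-- B replaces A's incremental dict build (per-element membership branch) by a key-directed nested
-- scan: distinct cleaned annotations first, then one full scan of the pairs per key.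

-- ===== PORT A =====
-- cleaning of one annotation string; the identical expression occurs verbatim in both Pythons
def pvClean (s : String) : String :=
  PySem.Str.replace (PySem.Str.replace (PySem.Str.replace
      (PySem.List.pyGetD ((PySem.Str.split? s "_-_").getD []) (-1) "")
      "_cds" "_CDS") "_trna" "_tRNA") "_rrna" "rRNA"

def parse_geneious_fasta (fasta_matrix : List (List String)) : (List (String × List String)) × List String :=
  let row0 := PySem.List.pyGetD fasta_matrix 0 []
  let row1 := PySem.List.pyGetD fasta_matrix 1 []
  let seq_dict : PySem.Dict String (List String) :=
    (PySem.List.pyRange 0 (PySem.List.len row0) 1).foldl (fun d i =>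
      let ann := pvClean (PySem.List.pyGetD row0 i "")
      if d.contains ann then
        if (d.getD ann []).contains (PySem.List.pyGetD row1 i "") then d
        else d.modify ann [] (fun v => v ++ [PySem.List.pyGetD row1 i ""])
      else d.insert ann [PySem.List.pyGetD row1 i ""]) PySem.Dict.empty
  (seq_dict.items, seq_dict.keys)

-- ===== PORT B =====
-- B's inner per-key gathering loop
def pvGather (ps : List (String × String)) (k : String) : List String :=
  ps.foldl (fun g p => if p.1 == k && !(g.contains p.2) then g ++ [p.2] else g) []

def parse_geneious_fasta_alt (fasta_matrix : List (List String)) : (List (String × List String)) × List String :=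
  let annotations := (PySem.List.pyGetD fasta_matrix 0 []).map pvClean
  -- the 'append if not already in keys' loop is exactly set-of-list in first-occurrence order
  let keys := PySem.Set.ofList annotations
  let seq_dict : PySem.Dict String (List String) :=
    keys.foldl (fun d k =>
      d.insert k (pvGather (annotations.zip (PySem.List.pyGetD fasta_matrix 1 [])) k)) PySem.Dict.empty
  (seq_dict.items, keys)

-- ===== PRECONDITION & SPEC =====
-- Pre_ excludes exactly the inputs where A raises IndexError: an empty matrix, and a nonempty first
-- row without a second row at least as long (fasta_matrix[1][i] out of range).
def Pre_parse_geneious_fasta (fasta_matrix : List (List String)) : Prop :=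
  fasta_matrix ≠ [] ∧
    (fasta_matrix.getD 0 [] = [] ∨
      (2 ≤ fasta_matrix.length ∧ (fasta_matrix.getD 0 []).length ≤ (fasta_matrix.getD 1 []).length))
instance (fasta_matrix : List (List String)) : Decidable (Pre_parse_geneious_fasta fasta_matrix) := by unfold Pre_parse_geneious_fasta; infer_instance
def pvWitness_parse_geneious_fasta : List (List String) := [["a_-_b_cds", "a_-_b_cds"], ["AA", "AA"]]
def Spec_parse_geneious_fasta (fasta_matrix : List (List String)) (out : (List (String × List String)) × List String) : Prop := out = parse_geneious_fasta_alt fasta_matrix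
instance (fasta_matrix : List (List String)) (out : (List (String × List String)) × List String) : Decidable (Spec_parse_geneious_fasta fasta_matrix out) := by unfold Spec_parse_geneious_fasta; infer_instance

-- ===== CLAIM (what is proved, stated in full; the proofs are below) =====
def Claim_equal_parse_geneious_fasta : Prop := ∀ (fasta_matrix : List (List String)), Dom_parse_geneious_fasta fasta_matrix → Pre_parse_geneious_fasta fasta_matrix → Spec_parse_geneious_fasta fasta_matrix (parse_geneious_fasta fasta_matrix)

-- ===== LEMMAS AND PROOFS =====

set_option maxRecDepth 4000

-- A's loop body, as a step function over one (annotation, sequence) pair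
def pvStepA (d : PySem.Dict String (List String)) (p : String × String) : PySem.Dict String (List String) :=
  if d.contains p.1 then
    if (d.getD p.1 []).contains p.2 then d
    else d.modify p.1 [] (fun v => v ++ [p.2])
  else d.insert p.1 [p.2]

-- the dict B ends up with, described as a literal items list over the key set
def pvTbl (ps : List (String × String)) : PySem.Dict String (List String) :=
  PySem.Dict.mk ((PySem.Set.ofList (ps.map Prod.fst)).map (fun k => (k, pvGather ps k)))

theorem pvGet_tbl (K : List String) (f : String → List String) (a : String) :
    (PySem.Dict.mk (K.map (fun k => (k, f k)))).get? a = if a ∈ K then some (f a) else none := by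
  induction K with
  | nil => rfl
  | cons k K ih =>
    show (PySem.Dict.mk ((k, f k) :: K.map _)).get? a = _
    rw [PySem.Dict.get?_mk_cons]
    by_cases h : k = a
    · simp [h]
    · simp only [beq_iff_eq, if_neg h, ih, List.mem_cons]
      by_cases ha : a ∈ K
      · simp [ha]
      · simp [ha, Ne.symm h]

theorem pvGather_append (ps : List (String × String)) (p : String × String) (k : String) :
    pvGather (ps ++ [p]) k =
      if p.1 == k && !((pvGather ps k).contains p.2) then pvGather ps k ++ [p.2] else pvGather ps k := by
  unfold pvGather
  rw [List.foldl_append]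
  rfl

theorem pvGather_nil_of_not_mem (ps : List (String × String)) (k : String)
    (h : k ∉ ps.map Prod.fst) : pvGather ps k = [] := by
  induction ps with
  | nil => rfl
  | cons p ps ih =>
    simp only [List.map_cons, List.mem_cons, not_or] at h
    show (ps.foldl _ (if p.1 == k && !(List.contains [] p.2) then [] ++ [p.2] else [])) = []
    rw [if_neg (by simp only [Bool.and_eq_true, beq_iff_eq]; rintro ⟨he, -⟩; exact h.1 he.symm)]
    exact ih h.2

theorem pvFoldInsertFresh (K : List String) (f : String → List String) (hnd : K.Nodup) :
    K.foldl (fun d k => d.insert k (f k)) PySem.Dict.empty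
      = PySem.Dict.mk (K.map (fun k => (k, f k))) := by
  induction K using List.reverseRecOn with
  | nil => rfl
  | append_singleton K k ih =>
    have hsplit : K.Nodup ∧ k ∉ K := by
      rw [List.nodup_append] at hnd
      exact ⟨hnd.1, fun hk => hnd.2.2 k hk k (by simp) rfl⟩
    rw [List.foldl_append, List.foldl_cons, List.foldl_nil, ih hsplit.1]
    have hc : (PySem.Dict.mk (K.map (fun a => (a, f a)))).contains k = false := by
      rw [PySem.Dict.contains_eq_isSome_get?, pvGet_tbl, if_neg hsplit.2]
      rfl
    apply PySem.Dict.ext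
    rw [PySem.Dict.items_insert_of_not_contains _ _ hc]
    simp

theorem pvFold_eq_tbl (ps : List (String × String)) :
    ps.foldl pvStepA PySem.Dict.empty = pvTbl ps := by
  induction ps using List.reverseRecOn with
  | nil => rfl
  | append_singleton ps p ih =>
    rw [List.foldl_append, List.foldl_cons, List.foldl_nil, ih]
    unfold pvTbl pvStepA
    set K := PySem.Set.ofList (ps.map Prod.fst) with hK
    have hKmem : ∀ a, a ∈ K ↔ a ∈ ps.map Prod.fst := fun a =>
      PySem.Set.mem_ofList (ps.map Prod.fst) a
    have hK' : PySem.Set.ofList ((ps ++ [p]).map Prod.fst) = PySem.Set.add K p.1 := by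
      rw [List.map_append, PySem.Set.ofList_eq_foldl, List.foldl_append]
      rw [hK, PySem.Set.ofList_eq_foldl]
      rfl
    have hcont : (PySem.Dict.mk (K.map (fun k => (k, pvGather ps k)))).contains p.1
        = decide (p.1 ∈ ps.map Prod.fst) := by
      rw [PySem.Dict.contains_eq_isSome_get?, pvGet_tbl]
      by_cases h : p.1 ∈ ps.map Prod.fst
      · rw [if_pos ((hKmem p.1).mpr h)]
        simp [h]
      · rw [if_neg (fun hc => h ((hKmem p.1).mp hc))]
        simp [h]
    by_cases hp : p.1 ∈ ps.map Prod.fst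
    · -- key already present: the key list is unchanged
      have hcont' : (PySem.Dict.mk (K.map (fun k => (k, pvGather ps k)))).contains p.1 = true := by
        rw [hcont]; simp [hp]
      have hgd : (PySem.Dict.mk (K.map (fun k => (k, pvGather ps k)))).getD p.1 [] = pvGather ps p.1 := by
        rw [PySem.Dict.getD_eq_get?_getD, pvGet_tbl, if_pos ((hKmem p.1).mpr hp)]
        rfl
      have hKeq : PySem.Set.add K p.1 = K := by
        unfold PySem.Set.add PySem.Set.contains
        rw [if_pos (by simpa using (hKmem p.1).mpr hp)]
      rw [if_pos hcont', hgd, hK', hKeq]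
      by_cases hs : (pvGather ps p.1).contains p.2
      · have hsm : p.2 ∈ pvGather ps p.1 := by simpa using hs
        rw [if_pos hs]
        apply PySem.Dict.ext
        show K.map _ = K.map _
        apply List.map_congr_left
        intro k _
        rw [pvGather_append]
        by_cases hk : p.1 = k
        · subst hk
          rw [if_neg (by simp [hsm])]
        · rw [if_neg (by simp [beq_eq_false_iff_ne.mpr hk])]
      · have hsm : p.2 ∉ pvGather ps p.1 := by simpa using hs
        rw [if_neg hs, PySem.Dict.modify, hgd]
        apply PySem.Dict.ext
        rw [PySem.Dict.items_insert_of_contains _ _ hcont']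
        show (K.map _).map _ = K.map _
        rw [List.map_map]
        apply List.map_congr_left
        intro k _
        rw [pvGather_append]
        by_cases hk : p.1 = k
        · subst hk
          simp only [Function.comp, beq_self_eq_true, if_pos]
          rw [if_pos (by simp [hsm])]
        · have hne : (p.1 == k) = false := beq_eq_false_iff_ne.mpr hk
          have hne' : (k == p.1) = false := beq_eq_false_iff_ne.mpr (Ne.symm hk)
          simp only [Function.comp, hne, hne', Bool.false_and, if_neg (by decide : ¬false = true)]
    · -- fresh key: appended at the end
      have hcont' : (PySem.Dict.mk (K.map (fun k => (k, pvGather ps k)))).contains p.1 = false := by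
        rw [hcont]; simp [hp]
      have hnK : p.1 ∉ K := fun hc => hp ((hKmem p.1).mp hc)
      have hKeq : PySem.Set.add K p.1 = K ++ [p.1] := by
        unfold PySem.Set.add PySem.Set.contains
        rw [if_neg (by simpa using hnK)]
      rw [if_neg (by rw [hcont']; exact Bool.false_ne_true), hK', hKeq]
      apply PySem.Dict.ext
      rw [PySem.Dict.items_insert_of_not_contains _ _ hcont']
      show K.map _ ++ [(p.1, [p.2])] = (K ++ [p.1]).map _
      rw [List.map_append]
      congr 1
      · apply List.map_congr_left
        intro k hkK
        have hne : (p.1 == k) = false :=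
          beq_eq_false_iff_ne.mpr (fun he => hp ((hKmem p.1).mp (by rw [he]; exact hkK)))
        rw [pvGather_append, if_neg (by simp [hne])]
      · simp only [List.map_cons, List.map_nil]
        rw [pvGather_append, pvGather_nil_of_not_mem ps p.1 hp]
        simp

-- ===== VERDICT (by name: the statement is the Claim_ definition above) =====
theorem parse_geneious_fasta_spec : Claim_equal_parse_geneious_fasta := by
  intro fm _ hpre
  obtain ⟨hne, hcase⟩ := hpre
  unfold Spec_parse_geneious_fasta parse_geneious_fasta parse_geneious_fasta_alt
  dsimp only
  set row0 : List String := PySem.List.pyGetD fm 0 [] with hrow0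
  set row1 : List String := PySem.List.pyGetD fm 1 [] with hrow1
  have hrow0' : row0 = fm.getD 0 [] := by rw [hrow0, PySem.List.pyGetD_zero]
  rcases hcase with h0 | ⟨hlen, hle⟩
  · -- empty first row: both sides are the empty dict
    have h : row0 = [] := by rw [hrow0', h0]
    rw [h]
    rfl
  · have h01 : row0.length ≤ row1.length := by
      have h1 : (1 : Nat) < fm.length := by omega
      have e1 : row1 = fm[1] := by rw [hrow1]; exact PySem.List.pyGetD_ofNat fm 1 [] h1
      have e1' : fm.getD 1 [] = fm[1] := List.getD_eq_getElem fm [] h1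
      rw [hrow0', e1, ← e1']; exact hle
    set zs : List (String × String) := row0.zip row1 with hzs
    have hlz : zs.length = row0.length := by rw [hzs, List.length_zip]; omega
    -- A's index loop = a fold of pvStepA over the zipped (cleaned annotation, sequence) pairs
    have hA : (PySem.List.pyRange 0 (PySem.List.len row0) 1).foldl (fun d i =>
          if d.contains (pvClean (PySem.List.pyGetD row0 i "")) then
            if (d.getD (pvClean (PySem.List.pyGetD row0 i "")) []).contains (PySem.List.pyGetD row1 i "") then d
            else d.modify (pvClean (PySem.List.pyGetD row0 i "")) [] (fun v => v ++ [PySem.List.pyGetD row1 i ""])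
          else d.insert (pvClean (PySem.List.pyGetD row0 i "")) [PySem.List.pyGetD row1 i ""]) PySem.Dict.empty
        = ((row0.map pvClean).zip row1).foldl pvStepA PySem.Dict.empty := by
      have hrange : PySem.List.len row0 = ((zs.length : Nat) : Int) := by
        rw [PySem.List.len_eq, hlz]
      rw [hrange]
      rw [PySem.List.foldl_congr_mem (PySem.List.pyRange 0 (zs.length : Int) 1) _
          (fun acc j => pvStepA acc (pvClean (PySem.List.pyGetD zs j ("", "")).1, (PySem.List.pyGetD zs j ("", "")).2))
          PySem.Dict.empty ?_]
      · rw [PySem.List.foldl_pyRange_zero_pyGetD' zs ("", "")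
            (fun acc q => pvStepA acc (pvClean q.1, q.2)) PySem.Dict.empty]
        rw [show (row0.map pvClean).zip row1 = zs.map (fun q => (pvClean q.1, q.2)) from by
          rw [hzs, List.zip_map_left]; rfl]
        rw [List.foldl_map]
      · intro acc i hi
        rw [PySem.List.mem_pyRange_one] at hi
        have hi0 : 0 ≤ i := hi.1
        have hi2 : i < (zs.length : Int) := hi.2
        have ez : PySem.List.pyGetD zs i ("", "") = (row0[i.toNat]'(by omega), row1[i.toNat]'(by omega)) := by
          rw [PySem.List.pyGetD_eq_getElem zs ("", "") hi0 hi2]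
          exact List.getElem_zip
        have e0 : PySem.List.pyGetD row0 i "" = row0[i.toNat]'(by omega) :=
          PySem.List.pyGetD_eq_getElem row0 "" hi0 (by exact_mod_cast by omega)
        have e1 : PySem.List.pyGetD row1 i "" = row1[i.toNat]'(by omega) :=
          PySem.List.pyGetD_eq_getElem row1 "" hi0 (by exact_mod_cast by omega)
        show _ = pvStepA acc (pvClean (PySem.List.pyGetD zs i ("", "")).1, (PySem.List.pyGetD zs i ("", "")).2)
        rw [ez, e0, e1]
        rfl
    rw [hA]
    -- B's per-key insert loop (over the Nodup key set) builds exactly the pvTbl items list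
    set ps : List (String × String) := (row0.map pvClean).zip row1 with hps
    have hfst : ps.map Prod.fst = row0.map pvClean := by
      rw [hps]
      exact List.map_fst_zip (by simpa using h01)
    set K := PySem.Set.ofList (row0.map pvClean) with hKdef
    have hKnd : K.Nodup := by rw [hKdef]; exact PySem.Set.nodup_ofList _
    rw [pvFold_eq_tbl, pvFoldInsertFresh K (fun k => pvGather ps k) hKnd]
    unfold pvTbl
    rw [hfst, ← hKdef]
    congr 1
    simp [PySem.Dict.keys, List.map_map, Function.comp_def]
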